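-- pv_equiv track=rewrite | github.com/austinyuch/woocommerce-sync | src/API/util/ragicutil.py | get_str_regex
-- ===== SOURCE A (Python) =====
-- def get_str_regex(
--                 str_query):
--     """
--     同欄位的多選需要用regex (含去空格)
--     判斷: split to list, loop list, 建立regex字串
--     :param str_query: "|"區隔關鍵字字串
--         e.g. status=Angel|Seed|A str_status = "Angel|Seed|A"
--     :return: |區隔regex or 字串, e.g. "天使輪|A輪|B輪"
--     """
--     if str_query != "":
--         try:
--             lst_query = str(str_query).split("|")
--             lst_query = [str_this.strip() for  str_this in lst_query]
--             str_regex = "|".join(lst_query)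
--         except:
--             str_regex = ""
--     else:
--         str_regex = ""
--
--     return str_regex
-- ===== SOURCE B (Python) =====
-- def get_str_regex(str_query):
--     # One forward pass: emit characters, buffering whitespace so that runs of
--     # whitespace adjacent to a '|' (or at either end) are dropped.
--     s = str(str_query)
--     out = []
--     pend = []      # buffered whitespace inside the current part
--     after = True   # True while we are skipping leading whitespace of a part
--     for c in s:
--         if c == '|':
--             out.append('|')
--             pend = []
--             after = True
--         elif c in ' \t\n\r\v\f':
--             if not after:
--                 pend.append(c)
--         else:
--             out += pend
--             out.append(c)
--             pend = []
--             after = False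
--     return ''.join(out)
-- ===== Notes on version B (the rewrite author's own statement) =====
-- stated objective: alternative
-- what changed: Replaces the split-on-pipe / strip-each-part / join pipeline with a single forward scan over the characters that buffers whitespace and drops any whitespace run adjacent to a '|' or at either end of the string.
import Mathlib
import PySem

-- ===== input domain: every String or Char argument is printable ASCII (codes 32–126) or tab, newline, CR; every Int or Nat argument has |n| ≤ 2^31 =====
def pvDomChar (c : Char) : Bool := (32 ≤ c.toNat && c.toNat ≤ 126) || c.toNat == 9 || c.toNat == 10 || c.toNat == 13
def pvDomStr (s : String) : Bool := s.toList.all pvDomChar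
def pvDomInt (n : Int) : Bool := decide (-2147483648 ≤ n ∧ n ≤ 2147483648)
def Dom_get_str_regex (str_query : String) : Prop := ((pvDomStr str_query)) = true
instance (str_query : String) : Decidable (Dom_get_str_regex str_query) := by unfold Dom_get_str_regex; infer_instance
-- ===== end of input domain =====

-- B replaces A's split/strip-each/join pipeline by one forward scan that buffers
-- whitespace and drops runs adjacent to '|' or at either end (objective: alternative).

-- ===== PORT A =====
-- A: if nonempty, split on "|", strip each part, join with "|"; the try/except
-- never fires on a str input (string ops raise nothing here), so it is not ported.
def get_str_regex (str_query : String) : String :=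
  if str_query ≠ "" then
    String.ofList (PySem.Chars.join ['|']
      ((PySem.Chars.splitOn str_query.toList ['|']).map PySem.Chars.strip))
  else ""

-- ===== PORT B =====
-- Source B's test  c in ' \t\n\r\v\f'
def pvWsB (c : Char) : Bool :=
  c == ' ' || c == '\t' || c == '\n' || c == '\r' || c == '\x0b' || c == '\x0c'

-- Source B's single loop: out is the returned list (built here by the recursion),
-- pend the buffered whitespace, after the skip-leading-whitespace flag.
def pvScan : List Char → List Char → Bool → List Char
  | [], _, _ => []
  | c :: rest, pend, after =>
    if c = '|' then '|' :: pvScan rest [] true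
    else if pvWsB c then
      (if after then pvScan rest [] true else pvScan rest (pend ++ [c]) after)
    else pend ++ c :: pvScan rest [] false

def get_str_regex_alt (str_query : String) : String :=
  String.ofList (pvScan str_query.toList [] true)

-- ===== PRECONDITION & SPEC =====
def Spec_get_str_regex (str_query : String) (out : String) : Prop := out = get_str_regex_alt str_query
instance (str_query : String) (out : String) : Decidable (Spec_get_str_regex str_query out) := by unfold Spec_get_str_regex; infer_instance

-- ===== CLAIM (what is proved, stated in full; the proofs are below) =====
def Claim_equal_get_str_regex : Prop := ∀ (str_query : String), Dom_get_str_regex str_query → Spec_get_str_regex str_query (get_str_regex str_query)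

-- ===== LEMMAS AND PROOFS =====

-- reference split on '|' by plain structural recursion
def splitP : List Char → List (List Char)
  | [] => [[]]
  | c :: l => if c = '|' then [] :: splitP l
              else (c :: (splitP l).headI) :: (splitP l).tail

lemma splitP_cons_form (l : List Char) : ∃ h t, splitP l = h :: t := by
  cases l with
  | nil => exact ⟨[], [], rfl⟩
  | cons c l =>
    simp only [splitP]
    split
    · exact ⟨_, _, rfl⟩
    · exact ⟨_, _, rfl⟩

lemma go_spec : ∀ (fuel : Nat) (l cur : List Char) (accs : List (List Char)),
    l.length < fuel →
    PySem.Chars.splitOn.go ['|'] fuel l cur accs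
      = accs.reverse ++ (cur.reverse ++ (splitP l).headI) :: (splitP l).tail := by
  intro fuel
  induction fuel with
  | zero => intro l cur accs h; omega
  | succ f ih =>
    intro l cur accs h
    cases l with
    | nil =>
      simp [PySem.Chars.splitOn.go, splitP]
    | cons c rest =>
      rw [PySem.Chars.splitOn.go]
      by_cases hc : c = '|'
      · subst hc
        have hpre : List.isPrefixOf ['|'] ('|' :: rest) = true := by
          simp [List.isPrefixOf]
        simp only [hpre, if_true, List.length_cons, List.length_nil, List.drop_succ_cons,
          List.drop_zero]
        rw [ih rest [] (cur.reverse :: accs) (by simpa using Nat.lt_of_succ_lt_succ h)]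
        obtain ⟨hh, tt, hsp⟩ := splitP_cons_form rest
        simp [splitP, hsp]
      · have hpre : List.isPrefixOf ['|'] (c :: rest) = false := by
          simp [List.isPrefixOf]
          exact fun h' => (hc h'.symm).elim
        simp only [hpre, Bool.false_eq_true, if_false]
        rw [ih rest (c :: _) accs (Nat.lt_of_succ_lt_succ h)]
        simp [splitP, hc]

lemma splitOn_eq_splitP (l : List Char) : PySem.Chars.splitOn l ['|'] = splitP l := by
  unfold PySem.Chars.splitOn
  rw [go_spec (l.length + 1) l [] [] (Nat.lt_succ_self _)]
  obtain ⟨h, t, hsp⟩ := splitP_cons_form l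
  simp [hsp]

-- recursion equations for rstrip / strip
lemma rstrip_cons (c : Char) (l : List Char) :
    PySem.Chars.rstrip (c :: l)
      = if PySem.Chars.rstrip l = [] then (if PySem.Chars.isspace c then [] else [c])
        else c :: PySem.Chars.rstrip l := by
  unfold PySem.Chars.rstrip
  rw [List.reverse_cons, List.dropWhile_append]
  by_cases h : List.dropWhile PySem.Chars.isspace l.reverse = []
  · simp only [h, List.isEmpty_nil, if_true, List.reverse_nil, List.dropWhile]
    cases PySem.Chars.isspace c <;> simp
  · simp [h, List.isEmpty_iff, List.reverse_eq_nil_iff]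

lemma strip_nil : PySem.Chars.strip [] = [] := rfl

lemma strip_cons_ws {c : Char} (l : List Char) (h : PySem.Chars.isspace c = true) :
    PySem.Chars.strip (c :: l) = PySem.Chars.strip l := by
  unfold PySem.Chars.strip PySem.Chars.lstrip
  rw [List.dropWhile_cons_of_pos h]

lemma strip_cons_nws {c : Char} (l : List Char) (h : PySem.Chars.isspace c = false) :
    PySem.Chars.strip (c :: l) = PySem.Chars.rstrip (c :: l) := by
  unfold PySem.Chars.strip PySem.Chars.lstrip
  rw [List.dropWhile_cons_of_neg (by simp [h])]

-- on the ASCII+tab/newline/CR domain, Source B's whitespace test agrees with str.strip's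
lemma ws_eq (c : Char) (h : pvDomChar c = true) : pvWsB c = PySem.Chars.isspace c := by
  have hiff : ∀ d : Char, (c = d) ↔ (c.toNat = d.toNat) := by
    intro d
    constructor
    · intro e; rw [e]
    · intro e; exact Char.ext (UInt32.toNat_inj.mp e)
  rw [Bool.eq_iff_iff]
  simp only [pvDomChar, Bool.or_eq_true, Bool.and_eq_true, decide_eq_true_eq, beq_iff_eq] at h
  simp only [pvWsB, PySem.Chars.isspace, Bool.or_eq_true, Bool.and_eq_true, beq_iff_eq,
    decide_eq_true_eq, hiff]
  have h1 : (' ').toNat = 32 := rfl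
  have h2 : ('\t').toNat = 9 := rfl
  have h3 : ('\n').toNat = 10 := rfl
  have h4 : ('\r').toNat = 13 := rfl
  have h5 : ('\x0b').toNat = 11 := rfl
  have h6 : ('\x0c').toNat = 12 := rfl
  rw [h1, h2, h3, h4, h5, h6]
  omega

-- the joined tail: a '|' then the stripped part, for each later part
def pvTJ (ps : List (List Char)) : List Char :=
  (ps.map (fun p => '|' :: PySem.Chars.strip p)).flatten

-- the contribution of the current (already begun) part in state after = false
def pvFirst (pend p : List Char) : List Char :=
  if PySem.Chars.rstrip p = [] then [] else pend ++ PySem.Chars.rstrip p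

lemma join_strip_cons (h : List Char) (t : List (List Char)) :
    PySem.Chars.join ['|'] ((h :: t).map PySem.Chars.strip)
      = PySem.Chars.strip h ++ pvTJ t := by
  induction t generalizing h with
  | nil => simp [PySem.Chars.join, List.intercalate, pvTJ]
  | cons b r ih =>
    have : PySem.Chars.join ['|'] ((h :: b :: r).map PySem.Chars.strip)
        = PySem.Chars.strip h ++ ['|'] ++ PySem.Chars.join ['|'] ((b :: r).map PySem.Chars.strip) := by
      simp [PySem.Chars.join, List.intercalate]
    rw [this, ih b]
    simp [pvTJ]

-- the single-scan invariant: in state (pend, after) over the remaining input l,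
-- Source B's loop produces the stripped-and-joined parts of l
lemma pv_main : ∀ (l : List Char), (∀ c ∈ l, pvDomChar c = true) →
    (pvScan l [] true = PySem.Chars.strip (splitP l).headI ++ pvTJ (splitP l).tail)
    ∧ (∀ pend, pvScan l pend false = pvFirst pend (splitP l).headI ++ pvTJ (splitP l).tail) := by
  intro l
  induction l with
  | nil =>
    intro _
    constructor
    · simp [pvScan, splitP, pvTJ, strip_nil]
    · intro pend; simp [pvScan, splitP, pvTJ, pvFirst, PySem.Chars.rstrip]
  | cons c rest ih =>
    intro hdom
    have hc : pvDomChar c = true := hdom c (by simp)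
    obtain ⟨ihT, ihF⟩ := ih (fun x hx => hdom x (by simp [hx]))
    obtain ⟨h', t', hsp⟩ := splitP_cons_form rest
    rw [hsp] at ihT ihF
    simp only [List.headI, List.tail] at ihT ihF
    by_cases hpipe : c = '|'
    · subst hpipe
      constructor
      · simp only [pvScan, if_true, ihT, splitP, hsp]
        simp [pvTJ, strip_nil]
      · intro pend
        simp only [pvScan, if_true, ihT, splitP, hsp]
        simp [pvTJ, pvFirst, PySem.Chars.rstrip]
    · by_cases hws : pvWsB c = true
      · have hsp_c : PySem.Chars.isspace c = true := (ws_eq c hc) ▸ hws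
        have hsplit : splitP (c :: rest) = (c :: h') :: t' := by simp [splitP, hpipe, hsp]
        constructor
        · simp only [pvScan, hpipe, if_false, hws, if_true, ihT, hsplit]
          simp [strip_cons_ws _ hsp_c]
        · intro pend
          simp only [pvScan, hpipe, if_false, hws, if_true, ihF, hsplit]
          simp only [List.headI, List.tail]
          unfold pvFirst
          rw [rstrip_cons, hsp_c]
          by_cases hr : PySem.Chars.rstrip h' = []
          · simp [hr]
          · simp [hr, List.append_assoc]
      · have hsp_c : PySem.Chars.isspace c = false := by
          rw [← ws_eq c hc]; exact (Bool.not_eq_true _).mp hws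
        have hsplit : splitP (c :: rest) = (c :: h') :: t' := by simp [splitP, hpipe, hsp]
        have hstrip : PySem.Chars.strip (c :: h')
            = if PySem.Chars.rstrip h' = [] then [c] else c :: PySem.Chars.rstrip h' := by
          rw [strip_cons_nws _ hsp_c, rstrip_cons, hsp_c]
          split <;> simp
        constructor
        · simp only [pvScan, hpipe, if_false, hws, ihF, hsplit]
          simp only [List.headI, List.tail, hstrip]
          unfold pvFirst
          by_cases hr : PySem.Chars.rstrip h' = [] <;> simp [hr]
        · intro pend
          simp only [pvScan, hpipe, if_false, hws, ihF, hsplit]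
          simp only [List.headI, List.tail]
          unfold pvFirst
          rw [rstrip_cons, hsp_c]
          by_cases hr : PySem.Chars.rstrip h' = []
          · simp [hr]
          · simp [hr, List.append_assoc]

-- ===== VERDICT (by name: the statement is the Claim_ definition above) =====
theorem get_str_regex_spec : Claim_equal_get_str_regex := by
  intro s hdom
  unfold Spec_get_str_regex get_str_regex get_str_regex_alt
  have hdom' : ∀ c ∈ s.toList, pvDomChar c = true := by
    have := hdom
    unfold Dom_get_str_regex pvDomStr at this
    simpa [List.all_eq_true] using this
  by_cases hs : s = ""
  · subst hs
    simp [pvScan]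
  · rw [if_pos hs]
    congr 1
    rw [splitOn_eq_splitP]
    obtain ⟨h, t, hsp⟩ := splitP_cons_form s.toList
    rw [hsp, join_strip_cons]
    have := (pv_main s.toList hdom').1
    rw [hsp] at this
    simp only [List.headI, List.tail] at this
    rw [this]
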